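-- pv_equiv track=rewrite | github.com/manas-17045/LeetcodeSolutions | Leetcode 3801-3900/3809/3809.py | bestTower
-- ===== SOURCE A (Python) =====
-- def bestTower(towers: list[list[int]], center: list[int], radius: int) -> list[int]:
--     """
--     Finds the tower with the highest quality within a given Manhattan distance from a center point.
--     In case of a tie in quality, the tower with the smallest x-coordinate is chosen.
--     If there's still a tie, the tower with the smallest y-coordinate is chosen.
--
--     :param towers: A list of towers, where each tower is represented as [x, y, quality].
--     :param center: The center point [centerX, centerY].
--     :param radius: The maximum Manhattan distance from the center.
--     :return: The coordinates [x, y] of the best reachable tower.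
--     """
--     bestCoordinates = [-1, -1]
--     maxQuality = -1
--     centerX, centerY = center
--
--     for towerX, towerY, quality in towers:
--         distance = abs(towerX - centerX) + abs(towerY - centerY)
--
--         if distance <= radius:
--             if quality > maxQuality:
--                 maxQuality = quality
--                 bestCoordinates = [towerX, towerY]
--             elif quality == maxQuality:
--                 if towerX < bestCoordinates[0] or (towerX == bestCoordinates[0] and towerY < bestCoordinates[1]):
--                     bestCoordinates = [towerX, towerY]
--
--     return bestCoordinates
-- ===== SOURCE B (Python) =====
-- def bestTower(towers: list[list[int]], center: list[int], radius: int) -> list[int]: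
--     cx, cy = center
--     reachable = [t for t in towers if abs(t[0] - cx) + abs(t[1] - cy) <= radius]
--     if not reachable:
--         return [-1, -1]
--     top = max(t[2] for t in reachable)
--     finalists = [(t[0], t[1]) for t in reachable if t[2] == top]
--     x, y = min(finalists)
--     return [x, y]
-- ===== Notes on version B (the rewrite author's own statement) =====
-- stated objective: idiomatic
-- what changed: Replaces the single-pass mutable tracker (sentinel maxQuality=-1, in-loop tie-break against bestCoordinates) with a filter of reachable towers, a max over their qualities, and a lexicographic min over the top-quality coordinates.
-- intended difference: When the best reachable tower is not at (-1,-1) yet A's quality--1 sentinel at (-1,-1) strictly beats every reachable tower (quality below -1, or equal to -1 with lexicographically larger coordinates), A returns the sentinel's [-1,-1] while B returns that best reachable tower's coordinates, the intended value. — e.g. on bestTower([[0, 0, -2]], [0, 0], 0): A returns [-1, -1], B returns [0, 0]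
import Mathlib
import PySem

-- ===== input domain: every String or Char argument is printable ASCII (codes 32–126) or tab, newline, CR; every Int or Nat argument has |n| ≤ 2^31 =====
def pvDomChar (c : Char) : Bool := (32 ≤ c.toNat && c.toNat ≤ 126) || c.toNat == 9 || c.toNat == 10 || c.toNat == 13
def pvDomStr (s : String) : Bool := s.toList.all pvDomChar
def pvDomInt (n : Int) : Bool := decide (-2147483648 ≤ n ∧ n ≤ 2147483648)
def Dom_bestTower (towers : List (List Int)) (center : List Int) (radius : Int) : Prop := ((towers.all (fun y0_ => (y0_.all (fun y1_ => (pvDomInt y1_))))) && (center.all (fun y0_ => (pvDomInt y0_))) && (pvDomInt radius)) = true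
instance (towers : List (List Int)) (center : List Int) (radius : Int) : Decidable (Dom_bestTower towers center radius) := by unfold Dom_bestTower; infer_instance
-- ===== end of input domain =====

-- B replaces A's single-pass mutable tracker by filter-reachable / max-quality / lex-min of the finalists
-- (objective: idiomatic, same O(n) cost); where A's -1 sentinel wins over every reachable tower, A and B
-- differ — stated below as the intended difference D_bestTower.

-- ===== PORT A =====
-- the for-loop over towers; state = (bestCoordinates, maxQuality); a tower that is not [x, y, q]
-- would make Python raise ValueError (excluded by Pre_), the port returns the state unchanged there
def bestTowerLoop (cx cy radius : Int) : List (List Int) → List Int → Int → List Int × Int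
  | [], bc, mq => (bc, mq)
  | t :: rest, bc, mq =>
    match t with
    | [tx, ty, q] =>
      let distance := |tx - cx| + |ty - cy|
      if distance ≤ radius then
        if q > mq then bestTowerLoop cx cy radius rest [tx, ty] q
        else if q = mq then
          if tx < bc.getD 0 0 ∨ (tx = bc.getD 0 0 ∧ ty < bc.getD 1 0) then
            bestTowerLoop cx cy radius rest [tx, ty] mq
          else bestTowerLoop cx cy radius rest bc mq
        else bestTowerLoop cx cy radius rest bc mq
      else bestTowerLoop cx cy radius rest bc mq
    | _ => (bc, mq)

def bestTower (towers : List (List Int)) (center : List Int) (radius : Int) : List Int :=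
  match center with
  | [cx, cy] => (bestTowerLoop cx cy radius towers [-1, -1] (-1)).1
  | _ => []  -- Python raises ValueError unpacking center; excluded by Pre_

-- ===== PORT B =====
def bestTower_alt (towers : List (List Int)) (center : List Int) (radius : Int) : List Int :=
  match center with
  | [cx, cy] =>
    let reachable := towers.filter (fun t => decide (|t.getD 0 0 - cx| + |t.getD 1 0 - cy| ≤ radius))
    match reachable with
    | [] => [-1, -1]
    | _ :: _ =>
      -- max(t[2] for t in reachable); reachable ≠ [] so max? is some and the getD default is never used
      let top := (PySem.List.max? (reachable.map (fun t => t.getD 2 0)) (fun v => v)).getD 0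
      let finalists := (reachable.filter (fun t => decide (t.getD 2 0 = top))).map
        (fun t => (t.getD 0 0, t.getD 1 0))
      match PySem.List.min2? finalists (fun p => p.1) (fun p => p.2) with  -- min(finalists), tuple order
      | some (x, y) => [x, y]
      | none => [-1, -1]  -- unreachable: finalists is nonempty
  | _ => []  -- Python raises ValueError unpacking center; excluded by Pre_

-- ===== PRECONDITION & SPEC =====
-- Pre_ excludes only inputs on which Python A raises ValueError: a center that is not exactly
-- [cx, cy] or a tower entry that is not exactly [x, y, q] (unpacking fails).
def Pre_bestTower (towers : List (List Int)) (center : List Int) (radius : Int) : Prop :=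
  center.length = 2 ∧ ∀ t ∈ towers, t.length = 3
instance (towers : List (List Int)) (center : List Int) (radius : Int) : Decidable (Pre_bestTower towers center radius) := by unfold Pre_bestTower; infer_instance

def pvWitness_bestTower : List (List Int) × List Int × Int := ([[1, 2, 3], [0, 0, 5]], [0, 0], 5)

-- A tower's preference key (best = smallest): quality negated, then x, then y, compared lexicographically
def pvKey (t : List Int) : List Int := [-t.tail.tail.headI, t.headI, t.tail.headI]
def pvReachP (center : List Int) (radius : Int) (t : List Int) : Prop :=
  |t.headI - center.headI| + |t.tail.headI - center.tail.headI| ≤ radius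
-- When the best reachable tower is not at (-1,-1) yet A's quality -1 sentinel at (-1,-1) strictly beats
-- every reachable tower (quality < -1, or = -1 with lexicographically larger coordinates), A returns the
-- sentinel's [-1,-1] while B returns that best reachable tower's coordinates, the intended value.
def D_bestTower (towers : List (List Int)) (center : List Int) (radius : Int) : Prop :=
  ∃ t ∈ towers, pvReachP center radius t ∧ t.take 2 ≠ [-1, -1] ∧
    ∀ u ∈ towers, pvReachP center radius u → pvKey [-1, -1, -1] < pvKey u ∧ ¬ pvKey u < pvKey t
instance (towers : List (List Int)) (center : List Int) (radius : Int) : Decidable (D_bestTower towers center radius) := by unfold D_bestTower pvReachP; infer_instance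

def Spec_bestTower (towers : List (List Int)) (center : List Int) (radius : Int) (out : List Int) : Prop := ¬ D_bestTower towers center radius → out = bestTower_alt towers center radius
instance (towers : List (List Int)) (center : List Int) (radius : Int) (out : List Int) : Decidable (Spec_bestTower towers center radius out) := by unfold Spec_bestTower; infer_instance

def pvDiffWitness_bestTower : List (List Int) × List Int × Int := ([[0, 0, -2]], [0, 0], 0)
def pvDiffWitnessOut_bestTower : (List Int) × (List Int) := ([-1, -1], [0, 0])

-- ===== CLAIM (what is proved, stated in full; the proofs are below) =====
def Claim_unchanged_bestTower : Prop := ∀ (towers : List (List Int)) (center : List Int) (radius : Int), Dom_bestTower towers center radius → Pre_bestTower towers center radius → Spec_bestTower towers center radius (bestTower towers center radius)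
def Claim_changed_bestTower : Prop := Dom_bestTower (pvDiffWitness_bestTower.1) (pvDiffWitness_bestTower.2.1) (pvDiffWitness_bestTower.2.2) ∧ Pre_bestTower (pvDiffWitness_bestTower.1) (pvDiffWitness_bestTower.2.1) (pvDiffWitness_bestTower.2.2) ∧ D_bestTower (pvDiffWitness_bestTower.1) (pvDiffWitness_bestTower.2.1) (pvDiffWitness_bestTower.2.2) ∧ bestTower (pvDiffWitness_bestTower.1) (pvDiffWitness_bestTower.2.1) (pvDiffWitness_bestTower.2.2) = pvDiffWitnessOut_bestTower.1 ∧ bestTower_alt (pvDiffWitness_bestTower.1) (pvDiffWitness_bestTower.2.1) (pvDiffWitness_bestTower.2.2) = pvDiffWitnessOut_bestTower.2 ∧ pvDiffWitnessOut_bestTower.1 ≠ pvDiffWitnessOut_bestTower.2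
def Claim_exact_bestTower : Prop := ∀ (towers : List (List Int)) (center : List Int) (radius : Int), Dom_bestTower towers center radius → Pre_bestTower towers center radius → D_bestTower towers center radius → bestTower towers center radius ≠ bestTower_alt towers center radius

-- ===== LEMMAS AND PROOFS =====

-- "t beats b" under A's ordering: higher quality, then smaller x, then smaller y
def pvBetter (b t : Int × Int × Int) : Prop :=
  b.2.2 < t.2.2 ∨ (t.2.2 = b.2.2 ∧ (t.1 < b.1 ∨ (t.1 = b.1 ∧ t.2.1 < b.2.1)))

def pvComb (b t : Int × Int × Int) : Int × Int × Int :=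
  if b.2.2 < t.2.2 ∨ (t.2.2 = b.2.2 ∧ (t.1 < b.1 ∨ (t.1 = b.1 ∧ t.2.1 < b.2.1))) then t else b

lemma pvComb_pos {b t : Int × Int × Int} (h : pvBetter b t) : pvComb b t = t := by
  unfold pvBetter at h; simp only [pvComb, if_pos h]

lemma pvComb_neg {b t : Int × Int × Int} (h : ¬ pvBetter b t) : pvComb b t = b := by
  unfold pvBetter at h; simp only [pvComb, if_neg h]

def pvTriple (t : List Int) : Int × Int × Int := (t.getD 0 0, t.getD 1 0, t.getD 2 0)

def pvReach (cx cy radius : Int) (L : List (List Int)) : List (Int × Int × Int) :=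
  (L.filter (fun t => decide (|t.getD 0 0 - cx| + |t.getD 1 0 - cy| ≤ radius))).map pvTriple

def pvBest (R : List (Int × Int × Int)) : List Int :=
  match R with
  | [] => [-1, -1]
  | h :: t => [(t.foldl pvComb h).1, (t.foldl pvComb h).2.1]

lemma pvBetter_asymm {a b : Int × Int × Int} (h : pvBetter a b) : ¬ pvBetter b a := by
  obtain ⟨a1, a2, a3⟩ := a; obtain ⟨b1, b2, b3⟩ := b
  simp only [pvBetter] at *; omega

lemma pvBetter_not_trans {a b c : Int × Int × Int} (h1 : ¬ pvBetter a b) (h2 : ¬ pvBetter b c) :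
    ¬ pvBetter a c := by
  obtain ⟨a1, a2, a3⟩ := a; obtain ⟨b1, b2, b3⟩ := b; obtain ⟨c1, c2, c3⟩ := c
  simp only [pvBetter] at *; omega

lemma pvMin_unique {m m' : Int × Int × Int} (h1 : ¬ pvBetter m m') (h2 : ¬ pvBetter m' m) :
    m = m' := by
  obtain ⟨a1, a2, a3⟩ := m; obtain ⟨b1, b2, b3⟩ := m'
  simp only [pvBetter] at *; simp only [Prod.mk.injEq]; omega

lemma pvBetter_irrefl (s : Int × Int × Int) : ¬ pvBetter s s := by
  obtain ⟨a1, a2, a3⟩ := s; simp only [pvBetter]; omega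

lemma pvFold_mem_min (rs : List (Int × Int × Int)) : ∀ s,
    rs.foldl pvComb s ∈ s :: rs ∧ ∀ x ∈ s :: rs, ¬ pvBetter (rs.foldl pvComb s) x := by
  induction rs with
  | nil =>
    intro s
    refine ⟨List.mem_singleton.2 rfl, ?_⟩
    intro x hx
    rw [List.mem_singleton] at hx; subst hx
    simp only [List.foldl_nil]
    exact pvBetter_irrefl x
  | cons t rs ih =>
    intro s
    simp only [List.foldl_cons]
    obtain ⟨ihm, ihmin⟩ := ih (pvComb s t)
    by_cases h : pvBetter s t
    · rw [pvComb_pos h] at ihm ihmin ⊢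
      refine ⟨List.mem_cons_of_mem _ ihm, ?_⟩
      intro x hx
      rcases List.mem_cons.1 hx with rfl | hx'
      · exact pvBetter_not_trans (ihmin t (List.mem_cons_self)) (pvBetter_asymm h)
      · exact ihmin x hx'
    · rw [pvComb_neg h] at ihm ihmin ⊢
      refine ⟨?_, ?_⟩
      · rcases List.mem_cons.1 ihm with hx' | hx'
        · rw [hx']; exact List.mem_cons_self
        · exact List.mem_cons_of_mem _ (List.mem_cons_of_mem _ hx')
      · intro x hx
        rcases List.mem_cons.1 hx with rfl | hx'
        · exact ihmin x List.mem_cons_self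
        rcases List.mem_cons.1 hx' with rfl | hx''
        · exact pvBetter_not_trans (ihmin s List.mem_cons_self) h
        · exact ihmin x (List.mem_cons_of_mem _ hx'')

lemma wf3 {t : List Int} (h : t.length = 3) : ∃ a b c, t = [a, b, c] := by
  rcases t with _ | ⟨a, t⟩; · simp at h
  rcases t with _ | ⟨b, t⟩; · simp at h
  rcases t with _ | ⟨c, t⟩; · simp at h
  rcases t with _ | ⟨d, t⟩
  · exact ⟨a, b, c, rfl⟩
  · simp at h

lemma pvReach_cons_pos {cx cy r tx ty q : Int} {L : List (List Int)}
    (h : |tx - cx| + |ty - cy| ≤ r) :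
    pvReach cx cy r ([tx, ty, q] :: L) = (tx, ty, q) :: pvReach cx cy r L := by
  simp only [pvReach, List.filter_cons]
  have : List.getD [tx, ty, q] 0 0 = tx := rfl
  simp [List.getD, h, pvTriple]

lemma pvReach_cons_neg {cx cy r tx ty q : Int} {L : List (List Int)}
    (h : ¬ (|tx - cx| + |ty - cy| ≤ r)) :
    pvReach cx cy r ([tx, ty, q] :: L) = pvReach cx cy r L := by
  simp only [pvReach, List.filter_cons]
  simp [List.getD, h]

lemma loopA_inv (cx cy r : Int) : ∀ (L : List (List Int)), (∀ t ∈ L, t.length = 3) →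
    ∀ bx b2 mq,
    bestTowerLoop cx cy r L [bx, b2] mq =
      (fun m => ([m.1, m.2.1], m.2.2)) ((pvReach cx cy r L).foldl pvComb (bx, b2, mq)) := by
  intro L
  induction L with
  | nil =>
    intro _ bx b2 mq
    simp [bestTowerLoop, pvReach]
  | cons t L ih =>
    intro hw bx b2 mq
    obtain ⟨tx, ty, q, rfl⟩ := wf3 (hw t List.mem_cons_self)
    have hwL : ∀ u ∈ L, u.length = 3 := fun u hu => hw u (List.mem_cons_of_mem _ hu)
    by_cases hd : |tx - cx| + |ty - cy| ≤ r
    · rw [pvReach_cons_pos hd, List.foldl_cons]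
      by_cases hq : mq < q
      · have hcomb : pvComb (bx, b2, mq) (tx, ty, q) = (tx, ty, q) := pvComb_pos (Or.inl hq)
        rw [hcomb]
        have step : bestTowerLoop cx cy r ([tx, ty, q] :: L) [bx, b2] mq =
            bestTowerLoop cx cy r L [tx, ty] q := by
          simp only [bestTowerLoop]
          rw [if_pos hd]
          try rw [if_pos hq]
        rw [step]
        exact ih hwL tx ty q
      · by_cases heq : q = mq
        · by_cases htie : tx < bx ∨ (tx = bx ∧ ty < b2)
          · have hcomb : pvComb (bx, b2, mq) (tx, ty, q) = (tx, ty, q) :=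
              pvComb_pos (Or.inr ⟨heq, htie⟩)
            rw [hcomb]
            have step : bestTowerLoop cx cy r ([tx, ty, q] :: L) [bx, b2] mq =
                bestTowerLoop cx cy r L [tx, ty] mq := by
              simp only [bestTowerLoop]
              rw [if_neg hq, if_pos heq]
              have h0 : List.getD [bx, b2] 0 0 = bx := rfl
              have h1 : List.getD [bx, b2] 1 0 = b2 := rfl
              rw [if_pos hd]
              simp only [h0, h1]
              rw [if_pos htie]
            rw [step, heq]
            exact ih hwL tx ty mq
          · have hcomb : pvComb (bx, b2, mq) (tx, ty, q) = (bx, b2, mq) :=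
              pvComb_neg (by
                rintro (h | ⟨_, h2⟩)
                · exact hq h
                · exact htie h2)
            rw [hcomb]
            have step : bestTowerLoop cx cy r ([tx, ty, q] :: L) [bx, b2] mq =
                bestTowerLoop cx cy r L [bx, b2] mq := by
              simp only [bestTowerLoop]
              rw [if_pos hd, if_neg hq, if_pos heq]
              have h0 : List.getD [bx, b2] 0 0 = bx := rfl
              have h1 : List.getD [bx, b2] 1 0 = b2 := rfl
              simp only [h0, h1]
              rw [if_neg htie]
            rw [step]
            exact ih hwL bx b2 mq
        · have hcomb : pvComb (bx, b2, mq) (tx, ty, q) = (bx, b2, mq) :=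
            pvComb_neg (by
              rintro (h | ⟨h1, _⟩)
              · exact hq h
              · exact heq h1)
          rw [hcomb]
          have step : bestTowerLoop cx cy r ([tx, ty, q] :: L) [bx, b2] mq =
              bestTowerLoop cx cy r L [bx, b2] mq := by
            simp only [bestTowerLoop]
            rw [if_pos hd, if_neg hq, if_neg heq]
          rw [step]
          exact ih hwL bx b2 mq
    · rw [pvReach_cons_neg hd]
      have step : bestTowerLoop cx cy r ([tx, ty, q] :: L) [bx, b2] mq =
          bestTowerLoop cx cy r L [bx, b2] mq := by
        simp only [bestTowerLoop]
        rw [if_neg hd]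
      rw [step]
      exact ih hwL bx b2 mq

lemma q_le_of_not_better {m x : Int × Int × Int} (h : ¬ pvBetter m x) : x.2.2 ≤ m.2.2 := by
  obtain ⟨a1, a2, a3⟩ := m; obtain ⟨b1, b2, b3⟩ := x
  replace h : ¬ (a3 < b3 ∨ (b3 = a3 ∧ (b1 < a1 ∨ (b1 = a1 ∧ b2 < a2)))) := h
  show b3 ≤ a3
  omega

def pvPairLt (a b : Int × Int) : Prop := a.1 < b.1 ∨ (a.1 = b.1 ∧ a.2 < b.2)

def pvCombP (m x : Int × Int) : Int × Int :=
  if (decide (x.1 < m.1) || (!decide (m.1 < x.1) && decide (x.2 < m.2))) then x else m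

lemma pvCombP_pos {m x : Int × Int} (h : pvPairLt x m) : pvCombP m x = x := by
  obtain ⟨a1, a2⟩ := m; obtain ⟨b1, b2⟩ := x
  replace h : b1 < a1 ∨ (b1 = a1 ∧ b2 < a2) := h
  simp only [pvCombP]
  split
  · rfl
  · rename_i hb
    exfalso; simp at hb; omega

lemma pvCombP_neg {m x : Int × Int} (h : ¬ pvPairLt x m) : pvCombP m x = m := by
  obtain ⟨a1, a2⟩ := m; obtain ⟨b1, b2⟩ := x
  replace h : ¬ (b1 < a1 ∨ (b1 = a1 ∧ b2 < a2)) := h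
  simp only [pvCombP]
  split
  · rename_i hb
    exfalso; simp at hb; omega
  · rfl

lemma pvPairLt_asymm {a b : Int × Int} (h : pvPairLt a b) : ¬ pvPairLt b a := by
  obtain ⟨a1, a2⟩ := a; obtain ⟨b1, b2⟩ := b
  replace h : a1 < b1 ∨ (a1 = b1 ∧ a2 < b2) := h
  show ¬ (b1 < a1 ∨ (b1 = a1 ∧ b2 < a2))
  omega

lemma pvPairLt_not_trans {a b c : Int × Int} (h1 : ¬ pvPairLt b a) (h2 : ¬ pvPairLt c b) :
    ¬ pvPairLt c a := by
  obtain ⟨a1, a2⟩ := a; obtain ⟨b1, b2⟩ := b; obtain ⟨c1, c2⟩ := c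
  replace h1 : ¬ (b1 < a1 ∨ (b1 = a1 ∧ b2 < a2)) := h1
  replace h2 : ¬ (c1 < b1 ∨ (c1 = b1 ∧ c2 < b2)) := h2
  show ¬ (c1 < a1 ∨ (c1 = a1 ∧ c2 < a2))
  omega

lemma pvPair_unique {a b : Int × Int} (h1 : ¬ pvPairLt a b) (h2 : ¬ pvPairLt b a) : a = b := by
  obtain ⟨a1, a2⟩ := a; obtain ⟨b1, b2⟩ := b
  replace h1 : ¬ (a1 < b1 ∨ (a1 = b1 ∧ a2 < b2)) := h1
  replace h2 : ¬ (b1 < a1 ∨ (b1 = a1 ∧ b2 < a2)) := h2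
  simp only [Prod.mk.injEq]
  omega

lemma pvPairFold_mem_min (l : List (Int × Int)) : ∀ s,
    l.foldl pvCombP s ∈ s :: l ∧ ∀ x ∈ s :: l, ¬ pvPairLt x (l.foldl pvCombP s) := by
  induction l with
  | nil =>
    intro s
    refine ⟨List.mem_singleton.2 rfl, ?_⟩
    intro x hx
    rw [List.mem_singleton] at hx; subst hx
    simp only [List.foldl_nil]
    obtain ⟨a1, a2⟩ := x
    show ¬ (a1 < a1 ∨ (a1 = a1 ∧ a2 < a2))
    omega
  | cons t l ih =>
    intro s
    simp only [List.foldl_cons]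
    obtain ⟨ihm, ihmin⟩ := ih (pvCombP s t)
    by_cases h : pvPairLt t s
    · rw [pvCombP_pos h] at ihm ihmin ⊢
      refine ⟨List.mem_cons_of_mem _ ihm, ?_⟩
      intro x hx
      rcases List.mem_cons.1 hx with hx' | hx'
      · rw [hx']
        exact pvPairLt_not_trans (ihmin t List.mem_cons_self) (pvPairLt_asymm h)
      · exact ihmin x hx'
    · rw [pvCombP_neg h] at ihm ihmin ⊢
      refine ⟨?_, ?_⟩
      · rcases List.mem_cons.1 ihm with hx' | hx'
        · rw [hx']; exact List.mem_cons_self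
        · exact List.mem_cons_of_mem _ (List.mem_cons_of_mem _ hx')
      · intro x hx
        rcases List.mem_cons.1 hx with hx' | hx'
        · rw [hx']; exact ihmin s List.mem_cons_self
        rcases List.mem_cons.1 hx' with hx'' | hx''
        · rw [hx'']; exact pvPairLt_not_trans (ihmin s List.mem_cons_self) h
        · exact ihmin x (List.mem_cons_of_mem _ hx'')

lemma foldl_some_aux {α : Type} (f : Option α → α → Option α) (g : α → α → α)
    (hf : ∀ m y, f (some m) y = some (g m y)) :
    ∀ (l : List α) (s : α), List.foldl f (some s) l = some (List.foldl g s l) := by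
  intro l
  induction l with
  | nil => intro s; rfl
  | cons y l ih =>
    intro s
    simp only [List.foldl_cons, hf]
    exact ih (g s y)

lemma min2?_cons (x : Int × Int) (l : List (Int × Int)) :
    PySem.List.min2? (x :: l) (fun p => p.1) (fun p => p.2) = some (List.foldl pvCombP x l) := by
  simp only [PySem.List.min2?, List.foldl_cons]
  exact foldl_some_aux _ pvCombP (fun m y => by
    simp only [pvCombP]
    cases hb : (decide (y.1 < m.1) || (!decide (m.1 < y.1) && decide (y.2 < m.2))) <;> rfl) l x

lemma pair_not_lt_of_not_better {m u : Int × Int × Int} (h : ¬ pvBetter m u)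
    (he : u.2.2 = m.2.2) : ¬ pvPairLt (u.1, u.2.1) (m.1, m.2.1) := by
  obtain ⟨a1, a2, a3⟩ := m; obtain ⟨b1, b2, b3⟩ := u
  replace h : ¬ (a3 < b3 ∨ (b3 = a3 ∧ (b1 < a1 ∨ (b1 = a1 ∧ b2 < a2)))) := h
  replace he : b3 = a3 := he
  show ¬ (b1 < a1 ∨ (b1 = a1 ∧ b2 < a2))
  omega

lemma mem_reach_iff {cx cy r : Int} {L : List (List Int)} {u : Int × Int × Int} :
    u ∈ pvReach cx cy r L ↔
      ∃ t ∈ L, (|List.getD t 0 0 - cx| + |List.getD t 1 0 - cy| ≤ r) ∧ u = pvTriple t := by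
  constructor
  · intro hp
    obtain ⟨t, ht, he⟩ := List.mem_map.1 hp
    obtain ⟨h1, h2⟩ := List.mem_filter.1 ht
    exact ⟨t, h1, by simpa using h2, he.symm⟩
  · rintro ⟨t, h1, h2, rfl⟩
    exact List.mem_map.2 ⟨t, List.mem_filter.2 ⟨h1, by simpa using h2⟩, rfl⟩

lemma listlt3 (a b c d e f : Int) :
    ([a, b, c] < [d, e, f] : Prop) ↔ (a < d ∨ (a = d ∧ (b < e ∨ (b = e ∧ c < f)))) := by
  constructor
  · intro h
    cases h with
    | rel h => exact Or.inl h
    | cons h3 =>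
      cases h3 with
      | rel h => exact Or.inr ⟨rfl, Or.inl h⟩
      | cons g3 =>
        cases g3 with
        | rel h => exact Or.inr ⟨rfl, Or.inr ⟨rfl, h⟩⟩
        | cons k3 => cases k3
  · intro h
    rcases h with h | ⟨rfl, h | ⟨rfl, h⟩⟩
    · exact List.Lex.rel h
    · exact List.Lex.cons (List.Lex.rel h)
    · exact List.Lex.cons (List.Lex.cons (List.Lex.rel h))

lemma headI0 (t : List Int) : t.headI = t.getD 0 0 := by
  rcases t with _ | ⟨a, t⟩ <;> rfl

lemma headI1 (t : List Int) : t.tail.getD 0 0 = t.getD 1 0 := by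
  rcases t with _ | ⟨a, _ | ⟨b, t⟩⟩ <;> rfl

lemma headI2 (t : List Int) : t.tail.getD 1 0 = t.getD 2 0 := by
  rcases t with _ | ⟨a, _ | ⟨b, _ | ⟨c, t⟩⟩⟩ <;> rfl

lemma reachP_iff (cx cy r : Int) (t : List Int) :
    pvReachP [cx, cy] r t ↔ |t.getD 0 0 - cx| + |t.getD 1 0 - cy| ≤ r := by
  simp only [pvReachP, headI0, headI1, List.headI_cons, List.tail_cons]

-- pvKey u < pvKey t says exactly that u strictly beats t under A's preference
lemma keyLt_iff (t u : List Int) : pvKey u < pvKey t ↔ pvBetter (pvTriple t) (pvTriple u) := by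
  simp only [pvKey, pvBetter, pvTriple, headI0, headI1, headI2, listlt3]
  omega

-- D_ in triple land: the fold minimum candidate t is not at (-1,-1) and the sentinel beats everyone
lemma D_iff (cx cy r : Int) (L : List (List Int)) (hw : ∀ t ∈ L, t.length = 3) :
    D_bestTower L [cx, cy] r ↔
      ∃ m ∈ pvReach cx cy r L, ¬ (m.1 = -1 ∧ m.2.1 = -1) ∧
        ∀ u ∈ pvReach cx cy r L, pvBetter u (-1, -1, -1) ∧ ¬ pvBetter m u := by
  simp only [D_bestTower]
  constructor
  · rintro ⟨t, ht, hr, hne, hall⟩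
    obtain ⟨a, b, c, rfl⟩ := wf3 (hw t ht)
    refine ⟨pvTriple [a, b, c],
      mem_reach_iff.2 ⟨[a, b, c], ht, (reachP_iff cx cy r _).1 hr, rfl⟩, ?_, ?_⟩
    · simp only [List.take_succ_cons, List.take_zero] at hne
      simp only [pvTriple, List.getD_cons_zero, List.getD_cons_succ]
      intro hc
      obtain ⟨rfl, rfl⟩ := hc
      exact hne rfl
    · intro u hu
      obtain ⟨u', h1, h2, rfl⟩ := mem_reach_iff.1 hu
      obtain ⟨hs, hb⟩ := hall u' h1 ((reachP_iff cx cy r u').2 h2)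
      refine ⟨?_, ?_⟩
      · have := (keyLt_iff u' [-1, -1, -1]).1 hs
        simpa [pvTriple] using this
      · intro hx
        exact hb ((keyLt_iff [a, b, c] u').2 hx)
  · rintro ⟨m, hm, hcoord, hall⟩
    obtain ⟨t, ht, hr, rfl⟩ := mem_reach_iff.1 hm
    obtain ⟨a, b, c, rfl⟩ := wf3 (hw t ht)
    refine ⟨[a, b, c], ht, (reachP_iff cx cy r _).2 hr, ?_, ?_⟩
    · simp only [pvTriple, List.getD_cons_zero, List.getD_cons_succ] at hcoord
      simp only [List.take_succ_cons, List.take_zero]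
      intro hc
      apply hcoord
      simp only [List.cons.injEq] at hc
      exact ⟨hc.1, hc.2.1⟩
    · intro u hu hru
      obtain ⟨hs, hb⟩ := hall (pvTriple u)
        (mem_reach_iff.2 ⟨u, hu, (reachP_iff cx cy r u).1 hru, rfl⟩)
      refine ⟨?_, ?_⟩
      · apply (keyLt_iff u [-1, -1, -1]).2
        simpa [pvTriple] using hs
      · intro hx
        exact hb ((keyLt_iff [a, b, c] u).1 hx)

lemma altB (cx cy r : Int) (L : List (List Int)) (hw : ∀ t ∈ L, t.length = 3) :
    bestTower_alt L [cx, cy] r = pvBest (pvReach cx cy r L) := by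
  simp only [bestTower_alt]
  cases hfil : L.filter (fun t => decide (|t.getD 0 0 - cx| + |t.getD 1 0 - cy| ≤ r)) with
  | nil =>
    have : pvReach cx cy r L = [] := by
      simp only [pvReach]; rw [hfil]; try rfl
    rw [this]
    rfl
  | cons w ws =>
    have hreach : pvReach cx cy r L = pvTriple w :: ws.map pvTriple := by
      simp only [pvReach]; rw [hfil]; try rfl
    rw [hreach]
    obtain ⟨hMmem, hMmin⟩ := pvFold_mem_min (ws.map pvTriple) (pvTriple w)
    -- the running max over the qualities is the quality of the fold's minimum M
    have hmm : (w :: ws).map (fun t => List.getD t 2 0) =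
        (pvTriple w).2.2 :: (ws.map pvTriple).map (fun u => u.2.2) := by
      simp only [List.map_cons, List.map_map]
      rfl
    rw [hmm, PySem.List.max?_id_cons]
    have htop : ((ws.map pvTriple).map (fun u => u.2.2)).foldl max (pvTriple w).2.2 =
        ((ws.map pvTriple).foldl pvComb (pvTriple w)).2.2 := by
      have h1 := PySem.List.le_foldl_max ((ws.map pvTriple).map (fun u => u.2.2)) (pvTriple w).2.2
      have h2 := PySem.List.foldl_max_mem ((ws.map pvTriple).map (fun u => u.2.2)) (pvTriple w).2.2
      have hMle : ((ws.map pvTriple).foldl pvComb (pvTriple w)).2.2 ≤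
          ((ws.map pvTriple).map (fun u => u.2.2)).foldl max (pvTriple w).2.2 := by
        rcases List.mem_cons.1 hMmem with hx' | hx'
        · rw [hx']; exact h1.1
        · exact h1.2 _ (List.mem_map.2 ⟨_, hx', rfl⟩)
      have hleM : ((ws.map pvTriple).map (fun u => u.2.2)).foldl max (pvTriple w).2.2 ≤
          ((ws.map pvTriple).foldl pvComb (pvTriple w)).2.2 := by
        rcases h2 with hx' | hx'
        · rw [hx']
          exact q_le_of_not_better (hMmin _ List.mem_cons_self)
        · obtain ⟨u, hu, hu2⟩ := List.mem_map.1 hx'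
          rw [← hu2]
          exact q_le_of_not_better (hMmin u (List.mem_cons_of_mem _ hu))
      omega
    rw [Option.getD_some, htop]
    -- finalists, transported to triple land
    have hfin : ((w :: ws).filter (fun t => decide (List.getD t 2 0 =
          ((ws.map pvTriple).foldl pvComb (pvTriple w)).2.2))).map
            (fun t => (List.getD t 0 0, List.getD t 1 0)) =
        (((pvTriple w) :: ws.map pvTriple).filter (fun u => decide (u.2.2 =
          ((ws.map pvTriple).foldl pvComb (pvTriple w)).2.2))).map (fun u => (u.1, u.2.1)) := by
      rw [show ((pvTriple w) :: ws.map pvTriple) = (w :: ws).map pvTriple from rfl,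
        List.filter_map, List.map_map]
      rfl
    rw [hfin]
    have hMfin : (((ws.map pvTriple).foldl pvComb (pvTriple w)).1,
        ((ws.map pvTriple).foldl pvComb (pvTriple w)).2.1) ∈
        (((pvTriple w) :: ws.map pvTriple).filter (fun u => decide (u.2.2 =
          ((ws.map pvTriple).foldl pvComb (pvTriple w)).2.2))).map (fun u => (u.1, u.2.1)) :=
      List.mem_map.2 ⟨_, List.mem_filter.2 ⟨hMmem, by simp⟩, rfl⟩
    cases hP : (((pvTriple w) :: ws.map pvTriple).filter (fun u => decide (u.2.2 =
        ((ws.map pvTriple).foldl pvComb (pvTriple w)).2.2))).map (fun u => (u.1, u.2.1)) with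
    | nil => rw [hP] at hMfin; simp at hMfin
    | cons p0 ps =>
      rw [min2?_cons]
      obtain ⟨hpm, hpmin⟩ := pvPairFold_mem_min ps p0
      have h2 : ¬ pvPairLt (((ws.map pvTriple).foldl pvComb (pvTriple w)).1,
          ((ws.map pvTriple).foldl pvComb (pvTriple w)).2.1) (ps.foldl pvCombP p0) := by
        apply hpmin
        rw [hP] at hMfin
        exact hMfin
      have h1 : ¬ pvPairLt (ps.foldl pvCombP p0) (((ws.map pvTriple).foldl pvComb (pvTriple w)).1,
          ((ws.map pvTriple).foldl pvComb (pvTriple w)).2.1) := by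
        have hpm' := hpm
        rw [← hP] at hpm'
        obtain ⟨u, hu, hu2⟩ := List.mem_map.1 hpm'
        obtain ⟨humem, hueq⟩ := List.mem_filter.1 hu
        rw [← hu2]
        exact pair_not_lt_of_not_better (hMmin u humem) (by simpa using hueq)
      rw [pvPair_unique h1 h2]
      rfl

-- ===== VERDICT (by name: the statement is the Claim_ definition above) =====
theorem bestTower_spec : Claim_unchanged_bestTower := by
  intro towers center radius _ hpre
  obtain ⟨hc2, hw⟩ := hpre
  obtain ⟨cx, cy, rfl⟩ : ∃ a b, center = [a, b] := by
    rcases center with _ | ⟨a, t⟩; · simp at hc2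
    rcases t with _ | ⟨b, t⟩; · simp at hc2
    rcases t with _ | ⟨c, t⟩
    · exact ⟨a, b, rfl⟩
    · simp at hc2
  intro hND
  have hA : bestTower towers [cx, cy] radius =
      (bestTowerLoop cx cy radius towers [-1, -1] (-1)).1 := rfl
  rw [hA, loopA_inv cx cy radius towers hw (-1) (-1) (-1), altB cx cy radius towers hw]
  cases hR : pvReach cx cy radius towers with
  | nil => rfl
  | cons h0 t0 =>
    obtain ⟨hMmem, hMmin⟩ := pvFold_mem_min t0 h0
    obtain ⟨ham, hamin⟩ := pvFold_mem_min (h0 :: t0) (-1, -1, -1)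
    have hTD := fun h => hND ((D_iff cx cy radius towers hw).2 h)
    rw [hR] at hTD
    by_cases hall : ∀ u ∈ h0 :: t0, pvBetter u (-1, -1, -1)
    · -- sentinel beats everyone; ¬D_ forces the reachable minimum to sit at (-1,-1)
      have hM : t0.foldl pvComb h0 ∈ h0 :: t0 := hMmem
      have hco : (t0.foldl pvComb h0).1 = -1 ∧ (t0.foldl pvComb h0).2.1 = -1 := by
        by_contra hc
        exact hTD ⟨t0.foldl pvComb h0, hM, fun h => hc ⟨h.1, h.2⟩,
          fun u hu => ⟨hall u hu, hMmin u hu⟩⟩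
      have hfs : (h0 :: t0).foldl pvComb (-1, -1, -1) = (-1, -1, -1) := by
        rcases List.mem_cons.1 ham with h' | h'
        · exact h'
        · exact absurd (hall _ h') (hamin _ List.mem_cons_self)
      show ([((h0 :: t0).foldl pvComb (-1, -1, -1)).1,
        ((h0 :: t0).foldl pvComb (-1, -1, -1)).2.1] : List Int) = pvBest (h0 :: t0)
      rw [hfs, show pvBest (h0 :: t0) =
        [(t0.foldl pvComb h0).1, (t0.foldl pvComb h0).2.1] from rfl, hco.1, hco.2]
    · push_neg at hall
      obtain ⟨u0, hu0m, hu0⟩ := hall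
      have haM : (h0 :: t0).foldl pvComb (-1, -1, -1) = t0.foldl pvComb h0 := by
        apply pvMin_unique
        · exact hamin _ (List.mem_cons_of_mem _ hMmem)
        · rcases List.mem_cons.1 ham with h' | h'
          · rw [h']; exact pvBetter_not_trans (hMmin u0 hu0m) hu0
          · exact hMmin _ h'
      show ([((h0 :: t0).foldl pvComb (-1, -1, -1)).1,
        ((h0 :: t0).foldl pvComb (-1, -1, -1)).2.1] : List Int) = pvBest (h0 :: t0)
      rw [haM]
      rfl

theorem bestTower_changed : Claim_changed_bestTower := by
  unfold Claim_changed_bestTower; decide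

theorem bestTower_tight : Claim_exact_bestTower := by
  intro towers center radius _ hpre hD
  obtain ⟨hc2, hw⟩ := hpre
  obtain ⟨cx, cy, rfl⟩ : ∃ a b, center = [a, b] := by
    rcases center with _ | ⟨a, t⟩; · simp at hc2
    rcases t with _ | ⟨b, t⟩; · simp at hc2
    rcases t with _ | ⟨c, t⟩
    · exact ⟨a, b, rfl⟩
    · simp at hc2
  obtain ⟨m, hm, hcoord, hall⟩ := (D_iff cx cy radius towers hw).1 hD
  intro heq
  have hA : bestTower towers [cx, cy] radius =
      (bestTowerLoop cx cy radius towers [-1, -1] (-1)).1 := rfl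
  rw [hA, loopA_inv cx cy radius towers hw (-1) (-1) (-1),
    altB cx cy radius towers hw] at heq
  rcases hRl : pvReach cx cy radius towers with _ | ⟨h0, t0⟩
  · rw [hRl] at hm; simp at hm
  rw [hRl] at heq hm hall
  obtain ⟨hMmem, hMmin⟩ := pvFold_mem_min t0 h0
  obtain ⟨ham, hamin⟩ := pvFold_mem_min (h0 :: t0) (-1, -1, -1)
  -- the fold minimum of the reachable towers is exactly m, the D_ witness
  have hMm : t0.foldl pvComb h0 = m :=
    pvMin_unique (hMmin m hm) ((hall _ hMmem).2)
  -- A's fold keeps the sentinel, since the sentinel beats everyone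
  have hfs : (h0 :: t0).foldl pvComb (-1, -1, -1) = (-1, -1, -1) := by
    rcases List.mem_cons.1 ham with h' | h'
    · exact h'
    · exact absurd ((hall _ h').1) (hamin _ List.mem_cons_self)
  rw [hfs] at heq
  have h1 : ((-1 : Int)) = (t0.foldl pvComb h0).1 := by
    simpa [pvBest] using congrArg (fun l => List.getD l 0 0) heq
  have h2 : ((-1 : Int)) = (t0.foldl pvComb h0).2.1 := by
    simpa [pvBest] using congrArg (fun l => List.getD l 1 0) heq
  rw [hMm] at h1 h2
  exact hcoord ⟨h1.symm, h2.symm⟩
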